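-- pv_equiv track=rewrite | github.com/DanGidanehin/coursework | greedy.py | choose_best_cell
-- ===== SOURCE A (Python) =====
-- def choose_best_cell(adjacent_cells, matrix, sums, target_dev):
--     """
--     Вибрати найкращу клітину з суміжних для мінімізації дисбалансу
--
--     Args:
--         adjacent_cells: список суміжних вільних клітин
--         matrix: матриця вартостей
--         sums: поточні суми забудовників
--         target_dev: індекс цільового забудовника
--
--     Returns:
--         координати найкращої клітини
--     """
--     if len(adjacent_cells) == 1:
--         return adjacent_cells[0]
--
--     best_cell = None
--     min_imbalance = float("inf")
--
--     for i, j in adjacent_cells: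
--         # Симулювати додавання цієї клітини
--         temp_sums = sums.copy()
--         temp_sums[target_dev] += matrix[i][j]
--
--         # Обчислити дисбаланс
--         imbalance = calculate_imbalance(temp_sums)
--
--         if imbalance < min_imbalance:
--             min_imbalance = imbalance
--             best_cell = (i, j)
--
--     return best_cell if best_cell else adjacent_cells[0]
--
-- def calculate_imbalance(sums):
--     """
--     Обчислити дисбаланс між забудовниками
--
--     Args:
--         sums: список сум вартостей для кожного забудовника
--
--     Returns:
--         значення дисбалансу (різниця між максимальною та мінімальною сумою)
--     """
--     return max(sums) - min(sums)
-- ===== SOURCE B (Python) =====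
-- def choose_best_cell(adjacent_cells, matrix, sums, target_dev):
--     if len(adjacent_cells) == 1:
--         return adjacent_cells[0]
--     t = target_dev if target_dev >= 0 else target_dev + len(sums)
--     base = sums[t]
--     others = sums[:t] + sums[t + 1:]
--     hi = max(others) if others else None
--     lo = min(others) if others else None
--
--     def imbalance(i, j):
--         s = base + matrix[i][j]
--         top = s if hi is None else max(hi, s)
--         bot = s if lo is None else min(lo, s)
--         return top - bot
--
--     best = adjacent_cells[0]
--     best_imb = imbalance(*best)
--     for cell in adjacent_cells[1:]:
--         cur = imbalance(*cell)
--         if cur < best_imb: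
--             best_imb = cur
--             best = cell
--     return best
-- ===== Notes on version B (the rewrite author's own statement) =====
-- stated objective: faster
-- what changed: Instead of copying sums and rescanning the whole list with max()/min() for every candidate cell, B removes the target entry once, precomputes max/min of the remaining sums, and evaluates each cell's imbalance in O(1); the loop also starts from the first cell instead of a None/inf sentinel.
import Mathlib
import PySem

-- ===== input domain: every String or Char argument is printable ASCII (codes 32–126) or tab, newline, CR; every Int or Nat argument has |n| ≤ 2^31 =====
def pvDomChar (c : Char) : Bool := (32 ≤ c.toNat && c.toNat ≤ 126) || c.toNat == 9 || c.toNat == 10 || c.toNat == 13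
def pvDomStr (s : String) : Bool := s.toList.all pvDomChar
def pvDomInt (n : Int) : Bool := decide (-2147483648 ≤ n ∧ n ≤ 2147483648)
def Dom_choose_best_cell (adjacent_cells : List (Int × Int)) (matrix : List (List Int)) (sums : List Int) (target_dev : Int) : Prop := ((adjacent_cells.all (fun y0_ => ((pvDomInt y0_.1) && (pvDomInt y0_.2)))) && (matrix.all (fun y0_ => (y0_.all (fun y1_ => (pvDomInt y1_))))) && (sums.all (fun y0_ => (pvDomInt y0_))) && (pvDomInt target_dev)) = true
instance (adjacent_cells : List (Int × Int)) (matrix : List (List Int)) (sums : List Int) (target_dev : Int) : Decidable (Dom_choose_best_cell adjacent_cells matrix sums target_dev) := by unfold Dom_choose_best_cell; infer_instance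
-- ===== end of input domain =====

-- B replaces A's per-cell copy-and-rescan of sums (O(n·k)) by a one-time max/min of the
-- other developers' sums, giving each candidate cell's imbalance in O(1) (O(n+k) total).

-- ===== PORT A =====
-- max(sums) - min(sums); Python raises on the empty list — the getD 0 defaults are unreachable under Pre_
def calculate_imbalance (sums : List Int) : Int :=
  (PySem.List.max? sums (fun y => y)).getD 0 - (PySem.List.min? sums (fun y => y)).getD 0

def choose_best_cell (adjacent_cells : List (Int × Int)) (matrix : List (List Int)) (sums : List Int) (target_dev : Int) : Int × Int :=
  if adjacent_cells.length = 1 then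
    (PySem.List.pyGet? adjacent_cells 0).getD (0, 0)
  else
    -- best_cell = None, min_imbalance = inf, modelled as (none, none); imbalance < inf always holds
    let r := adjacent_cells.foldl
      (fun (st : Option (Int × Int) × Option Int) c =>
        let temp_sums := PySem.List.pySetD sums target_dev
          (PySem.List.pyGetD sums target_dev 0 +
            PySem.List.pyGetD (PySem.List.pyGetD matrix c.1 []) c.2 0)
        let imbalance := calculate_imbalance temp_sums
        match st.2 with
        | none => (some c, some imbalance)
        | some m => if imbalance < m then (some c, some imbalance) else st)
      (none, none)
    match r.1 with
    | some c => c
    | none => (PySem.List.pyGet? adjacent_cells 0).getD (0, 0)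

-- ===== PORT B =====
-- the O(1) imbalance of adding value v for the target, given max/min of the OTHER sums
def cbc_imb (hi lo : Option Int) (base v : Int) : Int :=
  let s := base + v
  (match hi with | none => s | some h => max h s) -
  (match lo with | none => s | some l => min l s)

def choose_best_cell_alt (adjacent_cells : List (Int × Int)) (matrix : List (List Int)) (sums : List Int) (target_dev : Int) : Int × Int :=
  if adjacent_cells.length = 1 then
    (PySem.List.pyGet? adjacent_cells 0).getD (0, 0)
  else
    let t : Int := if 0 ≤ target_dev then target_dev else target_dev + sums.length
    let base := PySem.List.pyGetD sums t 0
    let others := PySem.List.slice sums none (some t) ++ PySem.List.slice sums (some (t + 1)) none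
    let hi := PySem.List.max? others (fun y => y)
    let lo := PySem.List.min? others (fun y => y)
    let first := (PySem.List.pyGet? adjacent_cells 0).getD (0, 0)
    let r := (PySem.List.slice adjacent_cells (some 1) none).foldl
      (fun (st : (Int × Int) × Int) c =>
        let cur := cbc_imb hi lo base (PySem.List.pyGetD (PySem.List.pyGetD matrix c.1 []) c.2 0)
        if cur < st.2 then (c, cur) else st)
      (first, cbc_imb hi lo base (PySem.List.pyGetD (PySem.List.pyGetD matrix first.1 []) first.2 0))
    r.1

-- ===== PRECONDITION & SPEC =====
-- Pre_ excludes exactly the inputs where Python A raises: empty adjacent_cells (IndexError on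
-- adjacent_cells[0]), target_dev out of range for sums, or a cell whose coordinates are out of
-- range for matrix (all with Python's negative-index rule); with len(adjacent_cells) == 1 A
-- returns before any indexing, so nothing further is required there.
def Pre_choose_best_cell (adjacent_cells : List (Int × Int)) (matrix : List (List Int)) (sums : List Int) (target_dev : Int) : Prop :=
  adjacent_cells.length = 1 ∨
  (adjacent_cells ≠ [] ∧ PySem.Raise.InRange sums.length target_dev ∧
    ∀ c ∈ adjacent_cells,
      PySem.Raise.InRange matrix.length c.1 ∧
      PySem.Raise.InRange (PySem.List.pyGetD matrix c.1 []).length c.2)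

instance (adjacent_cells : List (Int × Int)) (matrix : List (List Int)) (sums : List Int) (target_dev : Int) : Decidable (Pre_choose_best_cell adjacent_cells matrix sums target_dev) := by unfold Pre_choose_best_cell; infer_instance

def pvWitness_choose_best_cell : (List (Int × Int)) × List (List Int) × List Int × Int :=
  ([(0, 0), (0, 1), (1, 0)], [[3, 1], [2, 5]], [4, 7, 1], 0)

def Spec_choose_best_cell (adjacent_cells : List (Int × Int)) (matrix : List (List Int)) (sums : List Int) (target_dev : Int) (out : Int × Int) : Prop := out = choose_best_cell_alt adjacent_cells matrix sums target_dev
instance (adjacent_cells : List (Int × Int)) (matrix : List (List Int)) (sums : List Int) (target_dev : Int) (out : Int × Int) : Decidable (Spec_choose_best_cell adjacent_cells matrix sums target_dev out) := by unfold Spec_choose_best_cell; infer_instance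

-- ===== CLAIM (what is proved, stated in full; the proofs are below) =====
def Claim_equal_choose_best_cell : Prop := ∀ (adjacent_cells : List (Int × Int)) (matrix : List (List Int)) (sums : List Int) (target_dev : Int), Dom_choose_best_cell adjacent_cells matrix sums target_dev → Pre_choose_best_cell adjacent_cells matrix sums target_dev → Spec_choose_best_cell adjacent_cells matrix sums target_dev (choose_best_cell adjacent_cells matrix sums target_dev)

-- ===== LEMMAS AND PROOFS =====

theorem cbc_foldl_max_cons (a b : Int) (l : List Int) :
    l.foldl max (max a b) = max a (l.foldl max b) := by
  induction l generalizing b with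
  | nil => rfl
  | cons c t ih =>
    simp only [List.foldl_cons]
    rw [max_assoc, ih]

theorem cbc_foldl_min_cons (a b : Int) (l : List Int) :
    l.foldl min (min a b) = min a (l.foldl min b) := by
  induction l generalizing b with
  | nil => rfl
  | cons c t ih =>
    simp only [List.foldl_cons]
    rw [min_assoc, ih]

theorem cbc_foldl_max_perm {l₁ l₂ : List Int} (h : l₁.Perm l₂) (a : Int) :
    l₁.foldl max a = l₂.foldl max a := by
  exact h.foldl_eq a

theorem cbc_foldl_min_perm {l₁ l₂ : List Int} (h : l₁.Perm l₂) (a : Int) :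
    l₁.foldl min a = l₂.foldl min a := by
  exact h.foldl_eq a

-- the value of max over a list with x inserted in the middle, in terms of max over the rest
theorem cbc_max?_middle (pre suf : List Int) (x : Int) :
    PySem.List.max? (pre ++ x :: suf) (fun y => y) =
      some (match PySem.List.max? (pre ++ suf) (fun y => y) with
            | none => x | some h => max h x) := by
  cases pre with
  | nil =>
    cases suf with
    | nil => simp [PySem.List.max?]
    | cons o t =>
      simp only [List.nil_append, PySem.List.max?_id_cons, List.foldl_cons]
      congr 1
      rw [cbc_foldl_max_cons]
      exact max_comm x _
  | cons p pt =>
    simp only [List.cons_append, PySem.List.max?_id_cons]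
    congr 1
    rw [cbc_foldl_max_perm (List.perm_middle (a := x) (l₁ := pt) (l₂ := suf)) p,
      List.foldl_cons, max_comm p x, cbc_foldl_max_cons]
    exact max_comm x _

theorem cbc_min?_middle (pre suf : List Int) (x : Int) :
    PySem.List.min? (pre ++ x :: suf) (fun y => y) =
      some (match PySem.List.min? (pre ++ suf) (fun y => y) with
            | none => x | some l => min l x) := by
  cases pre with
  | nil =>
    cases suf with
    | nil => simp [PySem.List.min?]
    | cons o t =>
      simp only [List.nil_append, PySem.List.min?_id_cons, List.foldl_cons]
      congr 1
      rw [cbc_foldl_min_cons]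
      exact min_comm x _
  | cons p pt =>
    simp only [List.cons_append, PySem.List.min?_id_cons]
    congr 1
    rw [cbc_foldl_min_perm (List.perm_middle (a := x) (l₁ := pt) (l₂ := suf)) p,
      List.foldl_cons, min_comm p x, cbc_foldl_min_cons]
    exact min_comm x _

-- normalising a Python index: pyIdx? under InRange
theorem cbc_pyIdx_norm (n : Nat) (i : Int) (h : PySem.Raise.InRange n i) :
    PySem.List.pyIdx? n i = some (if 0 ≤ i then i else i + n).toNat := by
  obtain ⟨h1, h2⟩ := h
  by_cases hi : 0 ≤ i
  · simp [PySem.List.pyIdx?, hi, h2]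
  · simp only [PySem.List.pyIdx?, hi, if_false, h1, if_true]
    congr 1
    omega

theorem cbc_pyGetD_norm {α : Type} (xs : List α) (i : Int) (d : α)
    (h : PySem.Raise.InRange xs.length i) :
    PySem.List.pyGetD xs i d = xs.getD (if 0 ≤ i then i else i + xs.length).toNat d := by
  simp only [PySem.List.pyGetD, PySem.List.pyGet?, cbc_pyIdx_norm _ _ h]
  rfl

theorem cbc_pySetD_norm {α : Type} (xs : List α) (i : Int) (v : α)
    (h : PySem.Raise.InRange xs.length i) :
    PySem.List.pySetD xs i v = xs.set (if 0 ≤ i then i else i + xs.length).toNat v := by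
  simp [PySem.List.pySetD, PySem.List.pySet?, cbc_pyIdx_norm _ _ h]

-- list.set as take ++ value :: drop
theorem cbc_set_eq (l : List Int) (n : Nat) (x : Int) (hn : n < l.length) :
    l.set n x = l.take n ++ x :: l.drop (n + 1) := by
  induction l generalizing n with
  | nil => simp at hn
  | cons a tl ih =>
    cases n with
    | zero => simp
    | succ k =>
      simp only [List.set_cons_succ, List.take_succ_cons, List.drop_succ_cons, List.cons_append]
      rw [ih k (by simpa using hn)]

-- A's per-cell imbalance at nat index n equals B's O(1) formula
theorem cbc_imb_eq (sums : List Int) (n : Nat) (hn : n < sums.length) (v : Int) :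
    calculate_imbalance (sums.set n (sums.getD n 0 + v)) =
      cbc_imb (PySem.List.max? (sums.take n ++ sums.drop (n + 1)) (fun y => y))
              (PySem.List.min? (sums.take n ++ sums.drop (n + 1)) (fun y => y))
              (sums.getD n 0) v := by
  have hset : sums.set n (sums.getD n 0 + v) =
      sums.take n ++ (sums.getD n 0 + v) :: sums.drop (n + 1) :=
    cbc_set_eq sums n _ hn
  rw [hset]
  unfold calculate_imbalance cbc_imb
  rw [cbc_max?_middle, cbc_min?_middle]
  simp only [Option.getD_some]

-- A's loop over c :: rest from (None, inf) tracks B's loop over rest from (c, f c)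
theorem cbc_fold_rel (f : (Int × Int) → Int) (b : Int × Int) (m : Int)
    (rest : List (Int × Int)) :
    rest.foldl
      (fun (st : Option (Int × Int) × Option Int) c =>
        match st.2 with
        | none => (some c, some (f c))
        | some m' => if f c < m' then (some c, some (f c)) else st)
      (some b, some m)
    = (fun (p : (Int × Int) × Int) => (some p.1, some p.2))
        (rest.foldl
          (fun (st : (Int × Int) × Int) c => if f c < st.2 then (c, f c) else st)
          (b, m)) := by
  induction rest generalizing b m with
  | nil => rfl
  | cons d t ih =>
    simp only [List.foldl_cons]
    by_cases hd : f d < m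
    · simp only [if_pos hd]; exact ih d (f d)
    · simp only [if_neg hd]; exact ih b m

-- ===== VERDICT (by name: the statement is the Claim_ definition above) =====
theorem choose_best_cell_spec : Claim_equal_choose_best_cell := by
  intro cells matrix sums td hdom hpre
  unfold Spec_choose_best_cell
  by_cases h1 : cells.length = 1
  · simp only [choose_best_cell, choose_best_cell_alt, if_pos h1]
  · rcases hpre with h | ⟨hne, hrange, hcells⟩
    · exact absurd h h1
    obtain ⟨c, rest, rfl⟩ : ∃ c rest, cells = c :: rest := by
      cases cells with
      | nil => exact absurd rfl hne
      | cons c rest => exact ⟨c, rest, rfl⟩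
    set t : Int := if 0 ≤ td then td else td + sums.length with ht
    have ht0 : 0 ≤ t := by
      rcases hrange with ⟨ha, hb⟩
      rw [ht]; split_ifs <;> omega
    have htrange : PySem.Raise.InRange sums.length t := by
      rcases hrange with ⟨ha, hb⟩
      constructor <;> (rw [ht]; split_ifs <;> omega)
    have hnlt : t.toNat < sums.length := by
      rcases htrange with ⟨ha, hb⟩; omega
    have hget : PySem.List.pyGetD sums td 0 = sums.getD t.toNat 0 := by
      rw [cbc_pyGetD_norm sums td 0 hrange]
    have hgett : PySem.List.pyGetD sums t 0 = sums.getD t.toNat 0 := by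
      rw [cbc_pyGetD_norm sums t 0 htrange, if_pos ht0]
    have hslices : PySem.List.slice sums none (some t) ++ PySem.List.slice sums (some (t + 1)) none
        = sums.take t.toNat ++ sums.drop (t.toNat + 1) := by
      rw [PySem.List.slice_to _ ht0, PySem.List.slice_from _ (by omega)]
      congr 2
      omega
    set f : (Int × Int) → Int := fun w =>
      cbc_imb (PySem.List.max? (sums.take t.toNat ++ sums.drop (t.toNat + 1)) (fun y => y))
              (PySem.List.min? (sums.take t.toNat ++ sums.drop (t.toNat + 1)) (fun y => y))
              (sums.getD t.toNat 0)
              (PySem.List.pyGetD (PySem.List.pyGetD matrix w.1 []) w.2 0) with hf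
    have hAbody : ∀ (w : Int × Int),
        calculate_imbalance (PySem.List.pySetD sums td
          (PySem.List.pyGetD sums td 0 +
            PySem.List.pyGetD (PySem.List.pyGetD matrix w.1 []) w.2 0)) = f w := by
      intro w
      rw [hget, cbc_pySetD_norm sums td _ hrange]
      rw [show (if (0:Int) ≤ td then td else td + (sums.length : Int)) = t from rfl]
      rw [cbc_imb_eq sums t.toNat hnlt]
    simp only [choose_best_cell, choose_best_cell_alt, if_neg h1]
    rw [hslices, hgett, PySem.List.slice_from_one]
    simp only [List.tail_cons, List.foldl_cons, PySem.List.pyGet?_zero_cons, Option.getD_some]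
    simp only [hAbody]
    rw [cbc_fold_rel f c (f c) rest]
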